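-- pv_equiv track=rewrite | github.com/m4xim1nus/LocalOuvert | scripts/datasets/datagouv_searcher.py | _get_preferred_format
-- ===== SOURCE A (Python) =====
-- def _get_preferred_format(records):
--     preferred_formats = ["csv", "xls", "json", "zip"] # Could be put outside
--
--     for format in preferred_formats:
--         for record in records:
--             if record.get("format: ") == format:
--                 return record
--
--     for record in records:
--         if record.get("format: ") is not None:
--             return record
--
--     return records[0] if records else None
-- ===== SOURCE B (Python) =====
-- def _get_preferred_format(records):
--     preferred_formats = ["csv", "xls", "json", "zip"]
--     best_idx = len(preferred_formats)
--     best = None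
--     first_non_null = None
--     for record in records:
--         fmt = record.get("format: ")
--         if first_non_null is None and fmt is not None:
--             first_non_null = record
--         if fmt in preferred_formats:
--             i = preferred_formats.index(fmt)
--             if i < best_idx:
--                 best_idx = i
--                 best = record
--     if best is not None:
--         return best
--     if first_non_null is not None:
--         return first_non_null
--     return records[0] if records else None
-- ===== Notes on version B (the rewrite author's own statement) =====
-- stated objective: alternative
-- what changed: Replaces A's one scan of records per preferred format (then another scan for a non-null format) with a single pass that tracks the record of lowest preferred-format index seen so far and the first record with a non-null format.
import Mathlib
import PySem

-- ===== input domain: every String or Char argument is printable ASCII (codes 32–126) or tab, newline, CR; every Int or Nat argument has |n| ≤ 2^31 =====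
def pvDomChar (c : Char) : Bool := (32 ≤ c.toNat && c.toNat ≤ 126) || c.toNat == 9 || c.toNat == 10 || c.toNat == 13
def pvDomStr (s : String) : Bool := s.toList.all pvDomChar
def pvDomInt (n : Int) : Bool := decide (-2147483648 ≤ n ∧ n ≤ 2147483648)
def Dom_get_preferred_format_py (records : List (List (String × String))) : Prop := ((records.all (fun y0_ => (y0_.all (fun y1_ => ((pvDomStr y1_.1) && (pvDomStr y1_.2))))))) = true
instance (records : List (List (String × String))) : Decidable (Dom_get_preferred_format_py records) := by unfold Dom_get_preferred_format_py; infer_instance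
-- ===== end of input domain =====

-- B replaces A's scan-per-preferred-format (plus a second fallback scan) with a single pass
-- over records keeping the lowest-priority-index record and the first non-null-format record
-- (alternative decomposition, same result).


-- dict.get on an association list (first matching key), shared by both ports
def pvDictGet (r : List (String × String)) (k : String) : Option String :=
  match r.find? (fun p => p.1 == k) with
  | some p => some p.2
  | none => none

-- ===== PORT A =====
-- A: for each preferred format in order, scan records for the first match; then a scan
-- for the first non-null format; then records[0] if records else None.
def get_preferred_format_py (records : List (List (String × String))) : Option (List (String × String)) :=
  match (["csv", "xls", "json", "zip"]).findSome?
      (fun fm => records.find? (fun record => pvDictGet record "format: " == some fm)) with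
  | some record => some record
  | none =>
    match records.find? (fun record => (pvDictGet record "format: ").isSome) with
    | some record => some record
    | none => records.head?

-- ===== PORT B =====
-- one pass: state = ((best_idx, best), first_non_null)
def pvAltStep (st : (Nat × Option (List (String × String))) × Option (List (String × String)))
    (record : List (String × String)) :
    (Nat × Option (List (String × String))) × Option (List (String × String)) :=
  let fmt := pvDictGet record "format: "
  let fnn := match st.2, fmt with
    | none, some _ => some record
    | a, _ => a
  let bp := match fmt.bind (fun f => PySem.List.index? ["csv", "xls", "json", "zip"] f) with
    | some i => if i < st.1.1 then (i, some record) else st.1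
    | none => st.1
  (bp, fnn)

def get_preferred_format_py_alt (records : List (List (String × String))) : Option (List (String × String)) :=
  let st := records.foldl pvAltStep ((4, none), none)
  match st.1.2 with
  | some record => some record
  | none =>
    match st.2 with
    | some record => some record
    | none => records.head?

-- ===== PRECONDITION & SPEC =====
def Spec_get_preferred_format_py (records : List (List (String × String))) (out : Option (List (String × String))) : Prop := out = get_preferred_format_py_alt records
instance (records : List (List (String × String))) (out : Option (List (String × String))) : Decidable (Spec_get_preferred_format_py records out) := by unfold Spec_get_preferred_format_py; infer_instance

-- ===== CLAIM (what is proved, stated in full; the proofs are below) =====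
def Claim_equal_get_preferred_format_py : Prop := ∀ (records : List (List (String × String))), Dom_get_preferred_format_py records → Spec_get_preferred_format_py records (get_preferred_format_py records)

-- ===== LEMMAS AND PROOFS =====

-- priority value of a record: index of its format among the preferred ones
def pvP (r : List (String × String)) : Option Nat :=
  (pvDictGet r "format: ").bind (fun f => PySem.List.index? ["csv", "xls", "json", "zip"] f)

-- right-fold characterisation of B's running minimum: (min priority index, first record attaining it)
def pvMin : List (List (String × String)) → Nat × Option (List (String × String))
  | [] => (4, none)
  | x :: xs =>
    let jc := pvMin xs
    match pvP x with
    | some k => if k ≤ jc.1 then (k, some x) else jc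
    | none => jc

theorem pvFold_spec (xs : List (List (String × String)))
    (i : Nat) (b n : Option (List (String × String))) (hi : i ≤ 4) :
    xs.foldl pvAltStep ((i, b), n) =
      ((if (pvMin xs).1 < i then pvMin xs else (i, b)),
        n.or (xs.find? (fun r => (pvDictGet r "format: ").isSome))) := by
  induction xs generalizing i b n with
  | nil =>
    rw [List.foldl_nil, pvMin, if_neg (by omega)]
    simp
  | cons x xs ih =>
    rw [List.foldl_cons]
    cases hfmt : pvDictGet x "format: " with
    | none =>
      have hstep : pvAltStep ((i, b), n) x = ((i, b), n) := by
        simp [pvAltStep, hfmt]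
      rw [hstep, ih i b n hi]
      simp [pvMin, pvP, hfmt]
    | some f =>
      cases hidx : PySem.List.index? ["csv", "xls", "json", "zip"] f with
      | none =>
        rw [PySem.List.index?_eq_idxOf?] at hidx
        have hstep : pvAltStep ((i, b), n) x = ((i, b), n.or (some x)) := by
          cases n <;> simp [pvAltStep, hfmt, hidx, Option.or]
        rw [hstep, ih i b _ hi]
        have hmin : pvMin (x :: xs) = pvMin xs := by
          simp [pvMin, pvP, hfmt, hidx]
        rw [hmin]
        cases n <;> simp [Option.or, hfmt]
      | some k =>
        have hk : k < 4 := by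
          obtain ⟨hlt, -, -⟩ := PySem.List.getElem_of_index?_eq_some hidx
          simpa using hlt
        rw [PySem.List.index?_eq_idxOf?] at hidx
        have hstep : pvAltStep ((i, b), n) x =
            ((if k < i then (k, some x) else (i, b)), n.or (some x)) := by
          cases n <;> simp [pvAltStep, hfmt, hidx, Option.or]
        have hmin : pvMin (x :: xs) = if k ≤ (pvMin xs).1 then (k, some x) else pvMin xs := by
          simp [pvMin, pvP, hfmt, hidx]
        have hn : (n.or (some x)).or (xs.find? (fun r => (pvDictGet r "format: ").isSome)) =
            n.or ((x :: xs).find? (fun r => (pvDictGet r "format: ").isSome)) := by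
          cases n <;> simp [Option.or, hfmt]
        rw [hstep]
        by_cases hki : k < i
        · rw [if_pos hki, ih k (some x) _ (by omega), hmin, hn]
          simp only [Prod.mk.injEq]
          refine ⟨?_, trivial⟩
          split_ifs <;> first | rfl | (exfalso; omega)
        · rw [if_neg hki, ih i b _ hi, hmin, hn]
          simp only [Prod.mk.injEq]
          refine ⟨?_, trivial⟩
          split_ifs <;> first | rfl | (exfalso; omega)

-- per-format match predicate used by A's scans
def pvM (i : Nat) (r : List (String × String)) : Bool :=
  pvDictGet r "format: " == some ((["csv", "xls", "json", "zip"]).getD i "")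

-- properties of pvMin linking it to A's per-format scans
theorem pvMin_spec (xs : List (List (String × String))) :
    (pvMin xs).1 ≤ 4 ∧
    (∀ i, i < (pvMin xs).1 → xs.find? (pvM i) = none) ∧
    ((pvMin xs).1 < 4 → xs.find? (pvM (pvMin xs).1) = (pvMin xs).2 ∧ (pvMin xs).2.isSome) ∧
    ((pvMin xs).1 = 4 → (pvMin xs).2 = none) := by
  induction xs with
  | nil => simp [pvMin]
  | cons x xs ih =>
    obtain ⟨ih1, ih2, ih3, ih4⟩ := ih
    cases hfmt : pvDictGet x "format: " with
    | none =>
      have hmin : pvMin (x :: xs) = pvMin xs := by simp [pvMin, pvP, hfmt]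
      have hxne : ∀ i : ℕ, ¬ (pvM i x = true) := by intro i; simp [pvM, hfmt]
      rw [hmin]
      refine ⟨ih1, ?_, ?_, ih4⟩
      · intro i hij
        rw [List.find?_cons_of_neg (hxne i)]
        exact ih2 i hij
      · intro h4
        rw [List.find?_cons_of_neg (hxne _)]
        exact ih3 h4
    | some f =>
      cases hidx : PySem.List.index? ["csv", "xls", "json", "zip"] f with
      | none =>
        have hnot : f ∉ ["csv", "xls", "json", "zip"] :=
          (PySem.List.index?_eq_none_iff _ _).mp hidx
        have hne : ∀ i : ℕ, i < 4 → ¬ (pvM i x = true) := by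
          intro i hi4 hcontra
          unfold pvM at hcontra
          simp [hfmt] at hcontra
          apply hnot
          rw [hcontra]
          interval_cases i <;> simp
        rw [PySem.List.index?_eq_idxOf?] at hidx
        have hmin : pvMin (x :: xs) = pvMin xs := by simp [pvMin, pvP, hfmt, hidx]
        rw [hmin]
        refine ⟨ih1, ?_, ?_, ih4⟩
        · intro i hij
          rw [List.find?_cons_of_neg (hne i (by omega))]
          exact ih2 i hij
        · intro h4
          rw [List.find?_cons_of_neg (hne _ h4)]
          exact ih3 h4
      | some k =>
        obtain ⟨hlt, hget, -⟩ := PySem.List.getElem_of_index?_eq_some hidx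
        have hk : k < 4 := by simpa using hlt
        have hmk : pvM k x = true := by
          unfold pvM
          rw [List.getD_eq_getElem _ _ hlt, hget]
          simp [hfmt]
        have hnd : (["csv", "xls", "json", "zip"] : List String).Nodup := by decide
        have hmne : ∀ i, i < 4 → i ≠ k → ¬ (pvM i x = true) := by
          intro i hi4 hik hcontra
          unfold pvM at hcontra
          have hi4' : i < (["csv", "xls", "json", "zip"] : List String).length := by simpa using hi4
          rw [List.getD_eq_getElem _ _ hi4'] at hcontra
          simp [hfmt] at hcontra
          exact hik (hnd.getElem_inj_iff.mp (hcontra.symm.trans hget.symm))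
        rw [PySem.List.index?_eq_idxOf?] at hidx
        have hmin : pvMin (x :: xs) = if k ≤ (pvMin xs).1 then (k, some x) else pvMin xs := by
          simp [pvMin, pvP, hfmt, hidx]
        by_cases hkj : k ≤ (pvMin xs).1
        · rw [hmin, if_pos hkj]
          refine ⟨by omega, ?_, ?_, by omega⟩
          · intro i hij
            simp only at hij
            rw [List.find?_cons_of_neg (hmne i (by omega) (by omega))]
            exact ih2 i (by omega)
          · intro _
            simp only
            rw [List.find?_cons_of_pos hmk]
            simp
        · rw [hmin, if_neg hkj]
          refine ⟨ih1, ?_, ?_, by omega⟩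
          · intro i hij
            rw [List.find?_cons_of_neg (hmne i (by omega) (by omega))]
            exact ih2 i hij
          · intro hj4
            rw [List.find?_cons_of_neg (hmne _ (by omega) (by omega))]
            exact ih3 hj4

theorem pvChain_eq (xs : List (List (String × String))) :
    (["csv", "xls", "json", "zip"]).findSome?
      (fun fm => xs.find? (fun r => pvDictGet r "format: " == some fm)) = (pvMin xs).2 := by
  obtain ⟨h1, h2, h3, h4⟩ := pvMin_spec xs
  rcases hmm : pvMin xs with ⟨j, c⟩
  rw [hmm] at h1 h2 h3 h4
  simp only at h1 h2 h3 h4 ⊢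
  have g0 : j ≠ 0 → xs.find? (fun r => pvDictGet r "format: " == some "csv") = none :=
    fun h => h2 0 (by omega)
  have g1 : 1 < j → xs.find? (fun r => pvDictGet r "format: " == some "xls") = none :=
    fun h => h2 1 (by omega)
  have g2 : 2 < j → xs.find? (fun r => pvDictGet r "format: " == some "json") = none :=
    fun h => h2 2 (by omega)
  have g3 : 3 < j → xs.find? (fun r => pvDictGet r "format: " == some "zip") = none :=
    fun h => h2 3 (by omega)
  interval_cases j
  · obtain ⟨hf, -⟩ := h3 (by omega)
    have hf' : xs.find? (fun r => pvDictGet r "format: " == some "csv") = c := hf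
    rw [List.findSome?_cons, hf']
    cases c <;> simp_all
  · obtain ⟨hf, -⟩ := h3 (by omega)
    have hf' : xs.find? (fun r => pvDictGet r "format: " == some "xls") = c := hf
    simp [List.findSome?_cons, g0 (by omega), hf']
    cases c <;> simp_all
  · obtain ⟨hf, -⟩ := h3 (by omega)
    have hf' : xs.find? (fun r => pvDictGet r "format: " == some "json") = c := hf
    simp [List.findSome?_cons, g0 (by omega), g1 (by omega), hf']
    cases c <;> simp_all
  · obtain ⟨hf, -⟩ := h3 (by omega)
    have hf' : xs.find? (fun r => pvDictGet r "format: " == some "zip") = c := hf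
    simp [List.findSome?_cons, g0 (by omega), g1 (by omega), g2 (by omega), hf']
    cases c <;> simp_all
  · rw [h4 rfl]
    simp [g0 (by omega), g1 (by omega), g2 (by omega), g3 (by omega)]

-- ===== VERDICT (by name: the statement is the Claim_ definition above) =====
theorem get_preferred_format_py_spec : Claim_equal_get_preferred_format_py := by
  intro records _
  unfold Spec_get_preferred_format_py get_preferred_format_py get_preferred_format_py_alt
  rw [pvChain_eq, pvFold_spec records 4 none none (by omega)]
  have h4 := (pvMin_spec records).2.2.2
  by_cases h : (pvMin records).1 < 4
  · simp only [if_pos h]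
    rcases (pvMin_spec records).2.2.1 h with ⟨-, hs⟩
    obtain ⟨r, hr⟩ := Option.isSome_iff_exists.mp hs
    simp [hr]
  · rw [if_neg h, h4 (by have := (pvMin_spec records).1; omega)]
    simp [Option.or]
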